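-- pv_equiv track=rewrite | github.com/vsinio/python_code | draftscode/draftlst.py | sort_rem
-- ===== SOURCE A (Python) =====
-- def sort_rem(lst):
--     uniq_el = set()
--     for el in lst:
--         if el not in uniq_el:
--             uniq_el.add(el)
--         else:
--             uniq_el.discard(el)
--     s = list(uniq_el)
--     s.sort()
--     return s
-- ===== SOURCE B (Python) =====
-- def sort_rem(lst):
--     s = sorted(lst)
--     out = []
--     i = 0
--     n = len(s)
--     while i < n:
--         j = i + 1
--         while j < n and s[j] == s[i]:
--             j += 1
--         if (j - i) % 2 == 1:
--             out.append(s[i])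
--         i = j
--     return out
-- ===== Notes on version B (the rewrite author's own statement) =====
-- stated objective: alternative
-- what changed: Instead of tracking occurrence parity in a toggle set and sorting at the end, B sorts the input first and then scans it once, grouping consecutive equal runs and emitting a run's element exactly when its length is odd, so the result is produced already in order.
import Mathlib
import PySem

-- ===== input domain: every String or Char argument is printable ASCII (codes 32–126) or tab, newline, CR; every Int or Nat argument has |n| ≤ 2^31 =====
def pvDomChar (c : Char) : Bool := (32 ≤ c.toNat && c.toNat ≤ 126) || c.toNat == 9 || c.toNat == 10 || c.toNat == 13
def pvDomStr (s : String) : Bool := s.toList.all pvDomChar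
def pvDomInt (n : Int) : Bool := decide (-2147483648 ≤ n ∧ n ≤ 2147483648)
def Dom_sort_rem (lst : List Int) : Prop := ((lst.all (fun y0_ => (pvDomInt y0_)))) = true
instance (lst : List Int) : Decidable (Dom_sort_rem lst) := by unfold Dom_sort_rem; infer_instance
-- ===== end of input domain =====

-- B sorts the input first and then removes even-length runs in one linear scan
-- (alternative algorithm, same result; A toggles a set and sorts the survivors).

-- ===== PORT A =====
-- Python iterates a set only to sort it; the sort makes the result independent
-- of hash order, so the insertion-order Set model is exact here.
def sort_rem (lst : List Int) : List Int :=
  let uniq_el := lst.foldl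
    (fun s el => if ¬ (el ∈ s) then PySem.Set.add s el else PySem.Set.discard s el)
    (PySem.Set.empty)
  PySem.List.sorted uniq_el (fun x => x) false

-- ===== PORT B =====
-- the inner 'while j < n and s[j] == s[i]' of Source B computes the run of elements
-- equal to s[i]; takeWhile/dropWhile is that inner loop, step for step
def sort_rem_runScan : List Int → List Int
  | [] => []
  | x :: xs =>
    if ((xs.takeWhile (fun y => y == x)).length + 1) % 2 = 1
    then x :: sort_rem_runScan (xs.dropWhile (fun y => y == x))
    else sort_rem_runScan (xs.dropWhile (fun y => y == x))
termination_by l => l.length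
decreasing_by
  all_goals exact Nat.lt_succ_of_le (List.Sublist.length_le (List.dropWhile_sublist _))

def sort_rem_alt (lst : List Int) : List Int :=
  sort_rem_runScan (PySem.List.sorted lst (fun x => x) false)

-- ===== PRECONDITION & SPEC =====
def Spec_sort_rem (lst : List Int) (out : List Int) : Prop := out = sort_rem_alt lst
instance (lst : List Int) (out : List Int) : Decidable (Spec_sort_rem lst out) := by unfold Spec_sort_rem; infer_instance

-- ===== CLAIM (what is proved, stated in full; the proofs are below) =====
def Claim_equal_sort_rem : Prop := ∀ (lst : List Int), Dom_sort_rem lst → Spec_sort_rem lst (sort_rem lst)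

-- ===== LEMMAS AND PROOFS =====

-- A's toggle loop: the set stays duplicate-free and holds z iff z occurs an odd number of times
lemma sort_rem_toggle_inv (lst : List Int) (s : PySem.Set Int) (hs : s.Nodup) :
    (lst.foldl (fun s el => if ¬ (el ∈ s) then PySem.Set.add s el else PySem.Set.discard s el) s).Nodup ∧
    ∀ z, z ∈ (lst.foldl (fun s el => if ¬ (el ∈ s) then PySem.Set.add s el else PySem.Set.discard s el) s) ↔
      ((z ∈ s) ↔ ¬ (lst.count z % 2 = 1)) := by
  induction lst generalizing s with
  | nil =>
    refine ⟨hs, fun z => ?_⟩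
    simp
  | cons hd tl ih =>
    simp only [List.foldl_cons]
    by_cases hmem : hd ∈ s
    · simp only [hmem, not_true_eq_false, if_false]
      obtain ⟨h1, h2⟩ := ih (PySem.Set.discard s hd) (hs.filter _)
      refine ⟨h1, fun z => ?_⟩
      rw [h2 z, PySem.Set.mem_discard]
      by_cases hx : z = hd
      · subst hx
        rw [List.count_cons_self]
        by_cases hodd : tl.count z % 2 = 1
        · have h3 : ¬ ((tl.count z + 1) % 2 = 1) := by omega
          simp [hmem, hodd, h3]
        · have h3 : (tl.count z + 1) % 2 = 1 := by omega
          simp [hmem, hodd, h3]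
      · have hc : (hd :: tl).count z = tl.count z := by
          simp [Ne.symm hx]
        rw [hc]
        simp only [ne_eq, hx, not_false_eq_true, and_true]
    · simp only [hmem, not_false_eq_true, if_true]
      have hadd : (PySem.Set.add s hd).Nodup := by
        have hc : s.contains hd = false := by simpa [List.contains_eq_mem] using hmem
        simp only [PySem.Set.add, hc]
        exact hs.append (List.nodup_singleton hd)
          (fun a ha hb => hmem ((List.mem_singleton.mp hb) ▸ ha))
      obtain ⟨h1, h2⟩ := ih (PySem.Set.add s hd) hadd
      refine ⟨h1, fun z => ?_⟩
      rw [h2 z, PySem.Set.mem_add]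
      by_cases hx : z = hd
      · subst hx
        rw [List.count_cons_self]
        by_cases hodd : tl.count z % 2 = 1
        · have h3 : ¬ ((tl.count z + 1) % 2 = 1) := by omega
          simp [hmem, hodd, h3]
        · have h3 : (tl.count z + 1) % 2 = 1 := by omega
          simp [hmem, hodd, h3]
      · have hc : (hd :: tl).count z = tl.count z := by
          simp [Ne.symm hx]
        rw [hc]
        simp only [hx, or_false]

-- on a ≤-sorted list the run scan's output is strictly increasing and
-- holds x iff x occurs an odd number of times
lemma sort_rem_runScan_spec (l : List Int) (h : l.Pairwise (· ≤ ·)) :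
    (sort_rem_runScan l).Pairwise (· < ·) ∧
    ∀ x, x ∈ sort_rem_runScan l ↔ l.count x % 2 = 1 := by
  induction hn : l.length using Nat.strong_induction_on generalizing l with
  | _ n ih =>
    match l, h with
    | [], _ => simp [sort_rem_runScan]
    | x :: xs, h =>
      obtain ⟨hhead, hxs⟩ := List.pairwise_cons.mp h
      have hrest_pw : (xs.dropWhile (fun y => y == x)).Pairwise (· ≤ ·) :=
        hxs.sublist (List.dropWhile_sublist _)
      have hrest_gt : ∀ y ∈ xs.dropWhile (fun y => y == x), x < y := by
        intro y hy
        rcases hr : xs.dropWhile (fun y => y == x) with _ | ⟨a, t⟩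
        · simp [hr] at hy
        · have hax : ¬ (a == x) = true := by
            have := List.head?_dropWhile_not (p := fun y => y == x) (l := xs)
            simp [hr] at this
            simpa using this
          have haxs : a ∈ xs := (List.dropWhile_sublist _).mem (hr ▸ List.mem_cons_self)
          have hxa : x < a :=
            lt_of_le_of_ne (hhead a haxs) (fun heq => hax (by simp [heq]))
          rw [hr] at hy
          rcases List.mem_cons.mp hy with rfl | hyt
          · exact hxa
          · exact lt_of_lt_of_le hxa ((List.pairwise_cons.mp (hr ▸ hrest_pw)).1 y hyt)
      have hrest_count_x : (xs.dropWhile (fun y => y == x)).count x = 0 := by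
        rw [List.count_eq_zero]
        intro hx; exact lt_irrefl x (hrest_gt x hx)
      have hrun_all : ∀ y ∈ xs.takeWhile (fun y => y == x), y = x := by
        intro y hy
        simpa using List.mem_takeWhile_imp hy
      have hsplit : xs = xs.takeWhile (fun y => y == x) ++ xs.dropWhile (fun y => y == x) :=
        (List.takeWhile_append_dropWhile).symm
      have hcount_x : (x :: xs).count x = (xs.takeWhile (fun y => y == x)).length + 1 := by
        have hrun : (xs.takeWhile (fun y => y == x)).count x
            = (xs.takeWhile (fun y => y == x)).length :=
          List.count_eq_length.mpr (fun y hy => by simpa using (hrun_all y hy).symm)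
        rw [List.count_cons_self]
        conv_lhs => rw [hsplit]
        rw [List.count_append, hrun, hrest_count_x]
      have hcount_ne : ∀ y, y ≠ x →
          (x :: xs).count y = (xs.dropWhile (fun y => y == x)).count y := by
        intro y hy
        have hrun : (xs.takeWhile (fun y => y == x)).count y = 0 := by
          rw [List.count_eq_zero]
          intro hmem; exact hy (hrun_all y hmem)
        have hc : (x :: xs).count y = xs.count y := by
          simp [Ne.symm hy]
        rw [hc]
        conv_lhs => rw [hsplit]
        rw [List.count_append, hrun, Nat.zero_add]
      have hlen : (xs.dropWhile (fun y => y == x)).length < n := by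
        have := List.Sublist.length_le (List.dropWhile_sublist (fun y => y == x) (l := xs))
        simp only [← hn, List.length_cons]
        omega
      obtain ⟨ihpw, ihmem⟩ := ih _ hlen _ hrest_pw rfl
      have hx_not_rest : x ∉ sort_rem_runScan (xs.dropWhile (fun y => y == x)) := by
        rw [ihmem x, hrest_count_x]; omega
      have hmem_gt : ∀ y ∈ sort_rem_runScan (xs.dropWhile (fun y => y == x)), x < y := by
        intro y hy
        have hc := (ihmem y).mp hy
        have : y ∈ xs.dropWhile (fun y => y == x) := by
          rw [← List.count_pos_iff]; omega
        exact hrest_gt y this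
      constructor
      · by_cases hcond : ((xs.takeWhile (fun y => y == x)).length + 1) % 2 = 1
        · rw [sort_rem_runScan, if_pos hcond]
          exact List.pairwise_cons.mpr ⟨hmem_gt, ihpw⟩
        · rw [sort_rem_runScan, if_neg hcond]; exact ihpw
      · intro z
        by_cases hz : z = x
        · subst hz
          rw [hcount_x]
          by_cases hcond : ((xs.takeWhile (fun y => y == z)).length + 1) % 2 = 1
          · rw [sort_rem_runScan, if_pos hcond]; simp [hcond]
          · rw [sort_rem_runScan, if_neg hcond]
            simp only [hcond, iff_false]
            exact hx_not_rest
        · rw [hcount_ne z hz, ← ihmem z]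
          by_cases hcond : ((xs.takeWhile (fun y => y == x)).length + 1) % 2 = 1
          · rw [sort_rem_runScan, if_pos hcond]
            simp [List.mem_cons, hz]
          · rw [sort_rem_runScan, if_neg hcond]

-- ===== VERDICT (by name: the statement is the Claim_ definition above) =====
theorem sort_rem_spec : Claim_equal_sort_rem := by
  intro lst _
  unfold Spec_sort_rem sort_rem sort_rem_alt
  obtain ⟨hNodup, hMem⟩ := sort_rem_toggle_inv lst PySem.Set.empty (by simp [PySem.Set.empty])
  have hsorted_pw : (PySem.List.sorted lst (fun x => x) false).Pairwise (· ≤ ·) := by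
    simpa using PySem.List.sorted_pairwise lst (fun x => x)
  obtain ⟨hScanPw, hScanMem⟩ := sort_rem_runScan_spec _ hsorted_pw
  apply PySem.List.sorted_eq_of_perm_of_pairwise_lt
  · -- permutation: same membership and both nodup
    refine (List.perm_ext_iff_of_nodup
      (hScanPw.imp (fun h => ne_of_lt h)) hNodup).mpr ?_
    intro a
    rw [hScanMem a, hMem a]
    rw [(PySem.List.sorted_perm lst (fun x => x) false).count_eq]
    simp [PySem.Set.empty]
  · exact hScanPw
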